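-- pv_equiv track=rewrite | github.com/David-Pintado/TFG-1.Caso_piloto | auxFunctionLibrary/pythonLib/auxFunctions.py | pluralize_word
-- ===== SOURCE A (Python) =====
-- from itertools import product
--
-- def pluralize_word(word):
--
--     """
--     Método para obtener la forma plural de una palabra en castellano. Si word es una palabra compuesta,
--     devuelve las permutaciones plurales de esa palabra.
--
--         Parámetros:
--             - word (str): Palabra en castellano a pluralizar
--         Retorna:
--             - pluralize_words_list (List[str]): Lista de plurales de la palabra. Incluye la forma singular
--     """
--
--     # Lista de sufijos comunes para la formación del plural en castellano
--     suffixes = {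
--         'z': 'ces',
--         'l': 'les',
--         'r': 'res',
--         'n': 'nes',
--         'y': 'yes',
--         'j': 'jes',
--         'd': 'des',
--         's': 'ses',
--         'x': 'xes'
--     }
--
--     prepositions = ["a", "ante", "bajo", "cabe", "con", "contra", "de", "desde", "durante", "en", "entre", "hacia", "hasta", "mediante", "para", "por", "según", "sin", "so", "sobre", "tras"]
--
--     words = word.split()
--
--     # Función para pluralizar una palabra individual
--     def pluralize(word):
--         for suffix, plural in suffixes.items():
--             if word.endswith(suffix):
--                 return word[:-1] + plural
--         return word + 's'
--
--     plural_permutations = []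
--     for word in words:
--         if word in prepositions:
--             plural_permutations.append([word])
--         else:
--             plural = pluralize(word)
--             if plural != word:
--                 plural_permutations.append([word, plural])
--             else:
--                 plural_permutations.append([word])
--
--     composite_permutations = product(*plural_permutations)
--     pluralize_words_list = []
--     for permutation in composite_permutations:
--         pluralize_words_list.append(" ".join(permutation))
--
--     return pluralize_words_list
-- ===== SOURCE B (Python) =====
-- def pluralize_word(word):
--     prepositions = {"a", "ante", "bajo", "cabe", "con", "contra", "de", "desde", "durante", "en", "entre", "hacia", "hasta", "mediante", "para", "por", "según", "sin", "so", "sobre", "tras"}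
--
--     def options(w):
--         # singular plus (unless a preposition) its plural; every A-suffix except 'z'
--         # keeps the final consonant, i.e. just appends 'es'
--         if w in prepositions:
--             return [w]
--         if w.endswith('z'):
--             return [w, w[:-1] + 'ces']
--         if w and w[-1] in 'lrnyjdsx':
--             return [w, w + 'es']
--         return [w, w + 's']
--
--     words = word.split()
--     if not words:
--         return ['']
--     result = options(words[0])
--     for w in words[1:]:
--         opts = options(w)
--         result = [p + ' ' + o for p in result for o in opts]
--     return result
-- ===== Notes on version B (the rewrite author's own statement) =====
-- stated objective: simpler
-- what changed: B drops itertools.product and the final join loop, building the joined phrases directly with one accumulator fold over the words, and replaces the 9-entry suffix-dict scan by a single last-character test (every suffix except 'z' just appends 'es').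
import Mathlib
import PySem

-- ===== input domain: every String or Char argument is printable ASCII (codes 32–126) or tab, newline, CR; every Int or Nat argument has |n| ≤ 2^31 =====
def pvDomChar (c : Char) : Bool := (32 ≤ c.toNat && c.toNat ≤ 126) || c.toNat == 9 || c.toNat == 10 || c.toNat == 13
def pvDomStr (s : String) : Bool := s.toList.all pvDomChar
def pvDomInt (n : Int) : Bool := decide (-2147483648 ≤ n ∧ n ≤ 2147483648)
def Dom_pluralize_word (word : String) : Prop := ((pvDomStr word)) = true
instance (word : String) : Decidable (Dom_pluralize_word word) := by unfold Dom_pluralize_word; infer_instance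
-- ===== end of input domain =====

-- B replaces itertools.product + final " ".join pass by a single left fold that builds the
-- joined phrases directly, and replaces the 9-entry suffix dict scan by a last-character test
-- (every suffix except 'z' just appends "es"); objective: simpler.


-- ===== PORT A =====
def pvSuffixes : List (String × String) :=
  [("z","ces"),("l","les"),("r","res"),("n","nes"),("y","yes"),("j","jes"),("d","des"),("s","ses"),("x","xes")]

def pvPrepositions : List String :=
  ["a","ante","bajo","cabe","con","contra","de","desde","durante","en","entre","hacia","hasta","mediante","para","por","según","sin","so","sobre","tras"]

-- inner 'pluralize': first matching suffix wins; word[:-1] + plural, else word + 's'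
-- (string concatenation rendered as String.ofList of the concatenated code-point lists, exact)
def pvPluralize (w : String) : List (String × String) → String
  | [] => String.ofList (w.toList ++ "s".toList)
  | (suffix, plural) :: rest =>
      if PySem.Str.endswith w suffix then
        String.ofList ((PySem.Str.slice w none (some (-1))).toList ++ plural.toList)
      else pvPluralize w rest

-- itertools.product over the option lists (first factor varies slowest)
def pvProduct : List (List String) → List (List String)
  | [] => [[]]
  | l :: ls => l.flatMap (fun x => (pvProduct ls).map (x :: ·))

def pluralize_word (word : String) : List String :=
  let words := PySem.Str.split₀ word
  let plural_permutations := words.foldl (fun acc w =>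
    if w ∈ pvPrepositions then acc ++ [[w]]
    else
      let plural := pvPluralize w pvSuffixes
      if plural ≠ w then acc ++ [[w, plural]] else acc ++ [[w]]) []
  (pvProduct plural_permutations).foldl (fun out p => out ++ [PySem.Str.join " " p]) []

-- ===== PORT B =====
def pvPrepSet : PySem.Set String := PySem.Set.ofList
  ["a","ante","bajo","cabe","con","contra","de","desde","durante","en","entre","hacia","hasta","mediante","para","por","según","sin","so","sobre","tras"]

-- options(w) of Source B; 'w and w[-1] in "lrnyjdsx"' ported via pyGet? w (-1) (none ↔ w empty ↔ falsy;
-- a one-char membership in a string is membership in its code points, exact)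
def pvAltOptions (w : String) : List String :=
  if PySem.Set.contains pvPrepSet w then [w]
  else if PySem.Str.endswith w "z" then
    [w, String.ofList ((PySem.Str.slice w none (some (-1))).toList ++ "ces".toList)]
  else
    match PySem.Str.pyGet? w (-1) with
    | some c =>
        if c ∈ "lrnyjdsx".toList then [w, String.ofList (w.toList ++ "es".toList)]
        else [w, String.ofList (w.toList ++ "s".toList)]
    | none => [w, String.ofList (w.toList ++ "s".toList)]

def pluralize_word_alt (word : String) : List String :=
  match PySem.Str.split₀ word with
  | [] => [""]
  | w :: rest =>
      rest.foldl (fun result w' =>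
        let opts := pvAltOptions w'
        result.flatMap (fun p => opts.map (fun o => String.ofList (p.toList ++ ' ' :: o.toList))))
        (pvAltOptions w)

-- ===== PRECONDITION & SPEC =====
def Spec_pluralize_word (word : String) (out : List String) : Prop := out = pluralize_word_alt word
instance (word : String) (out : List String) : Decidable (Spec_pluralize_word word out) := by unfold Spec_pluralize_word; infer_instance

-- ===== CLAIM (what is proved, stated in full; the proofs are below) =====
def Claim_equal_pluralize_word : Prop := ∀ (word : String), Dom_pluralize_word word → Spec_pluralize_word word (pluralize_word word)

-- ===== LEMMAS AND PROOFS =====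

-- left-join accumulator abstracted out of B's fold, for the invariant
def pvJoinLeft (p : String) : List String → String
  | [] => p
  | o :: q => pvJoinLeft (String.ofList (p.toList ++ ' ' :: o.toList)) q

-- a one-character endswith is a test on the last character
theorem pv_ends1 (w s : String) (c : Char) (h : s.toList = [c]) :
    PySem.Str.endswith w s = decide (w.toList.getLast? = some c) := by
  have key : PySem.Str.endswith w s = true ↔ w.toList.getLast? = some c := by
    rw [PySem.Str.endswith_eq, PySem.Chars.endswith_iff, h, List.getLast?_eq_some_iff]
    exact ⟨fun ⟨t, ht⟩ => ⟨t, ht.symm⟩, fun ⟨t, ht⟩ => ⟨t, ht.symm⟩⟩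
  rcases hd : decide (w.toList.getLast? = some c) with _ | _
  · simp at hd
    rcases hb : PySem.Str.endswith w s with _|_
    · rfl
    · exact absurd (key.mp hb) hd
  · simp at hd; exact key.mpr hd

-- pyGet? at -1 is the last element
theorem pv_pyget_neg_one (l : List Char) : PySem.List.pyGet? l (-1) = l.getLast? := by
  rcases List.eq_nil_or_concat l with rfl | ⟨t, c, rfl⟩
  · decide
  · rw [List.concat_eq_append, PySem.List.pyGet?_neg_one_append_singleton]
    simp

theorem pv_pluralize_eq (w : String) : pvPluralize w pvSuffixes =
    match w.toList.getLast? with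
    | none => String.ofList (w.toList ++ "s".toList)
    | some c =>
        if c = 'z' then String.ofList (w.toList.dropLast ++ "ces".toList)
        else if c ∈ "lrnyjdsx".toList then String.ofList (w.toList ++ "es".toList)
        else String.ofList (w.toList ++ "s".toList) := by
  have hsl : (PySem.Str.slice w none (some (-1))).toList = w.toList.dropLast :=
    PySem.Str.slice_to_neg_one w
  simp only [pvSuffixes, pvPluralize, hsl,
    pv_ends1 w "z" 'z' rfl, pv_ends1 w "l" 'l' rfl, pv_ends1 w "r" 'r' rfl,
    pv_ends1 w "n" 'n' rfl, pv_ends1 w "y" 'y' rfl, pv_ends1 w "j" 'j' rfl,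
    pv_ends1 w "d" 'd' rfl, pv_ends1 w "s" 's' rfl, pv_ends1 w "x" 'x' rfl,
    decide_eq_true_eq]
  rcases hl : w.toList.getLast? with _ | c
  · simp
  · rcases List.getLast?_eq_some_iff.mp hl with ⟨t, ht⟩
    have hconcat : w.toList.dropLast ++ [c] = w.toList := by rw [ht]; simp
    simp only [Option.some.injEq]
    by_cases hz : c = 'z'
    · rw [if_pos hz, if_pos hz]
    · rw [if_neg hz, if_neg hz]
      by_cases h1 : c = 'l'
      · subst h1
        rw [if_pos rfl, if_pos (by decide)]
        refine congrArg String.ofList ?_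
        conv_rhs => rw [← hconcat]
        rw [List.append_assoc]
        exact congrArg _ (by decide)
      rw [if_neg h1]
      by_cases h2 : c = 'r'
      · subst h2
        rw [if_pos rfl, if_pos (by decide)]
        refine congrArg String.ofList ?_
        conv_rhs => rw [← hconcat]
        rw [List.append_assoc]
        exact congrArg _ (by decide)
      rw [if_neg h2]
      by_cases h3 : c = 'n'
      · subst h3
        rw [if_pos rfl, if_pos (by decide)]
        refine congrArg String.ofList ?_
        conv_rhs => rw [← hconcat]
        rw [List.append_assoc]
        exact congrArg _ (by decide)
      rw [if_neg h3]
      by_cases h4 : c = 'y'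
      · subst h4
        rw [if_pos rfl, if_pos (by decide)]
        refine congrArg String.ofList ?_
        conv_rhs => rw [← hconcat]
        rw [List.append_assoc]
        exact congrArg _ (by decide)
      rw [if_neg h4]
      by_cases h5 : c = 'j'
      · subst h5
        rw [if_pos rfl, if_pos (by decide)]
        refine congrArg String.ofList ?_
        conv_rhs => rw [← hconcat]
        rw [List.append_assoc]
        exact congrArg _ (by decide)
      rw [if_neg h5]
      by_cases h6 : c = 'd'
      · subst h6
        rw [if_pos rfl, if_pos (by decide)]
        refine congrArg String.ofList ?_
        conv_rhs => rw [← hconcat]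
        rw [List.append_assoc]
        exact congrArg _ (by decide)
      rw [if_neg h6]
      by_cases h7 : c = 's'
      · subst h7
        rw [if_pos rfl, if_pos (by decide)]
        refine congrArg String.ofList ?_
        conv_rhs => rw [← hconcat]
        rw [List.append_assoc]
        exact congrArg _ (by decide)
      rw [if_neg h7]
      by_cases h8 : c = 'x'
      · subst h8
        rw [if_pos rfl, if_pos (by decide)]
        refine congrArg String.ofList ?_
        conv_rhs => rw [← hconcat]
        rw [List.append_assoc]
        exact congrArg _ (by decide)
      rw [if_neg h8]
      split_ifs with hm
      · exfalso
        have e : "lrnyjdsx".toList = ['l','r','n','y','j','d','s','x'] := by decide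
        rw [e] at hm
        simp only [List.mem_cons, List.not_mem_nil, or_false] at hm
        exact hm.elim h1 fun hm => hm.elim h2 fun hm => hm.elim h3 fun hm => hm.elim h4 fun hm =>
          hm.elim h5 fun hm => hm.elim h6 fun hm => hm.elim h7 h8
      · rfl

theorem pv_pluralize_ne (w : String) : pvPluralize w pvSuffixes ≠ w := by
  intro heq
  have h' : (pvPluralize w pvSuffixes).toList = w.toList := by rw [heq]
  rw [pv_pluralize_eq w] at h'
  rcases hl : w.toList.getLast? with _ | c
  · simp only [hl, String.toList_ofList] at h'
    have := congrArg List.length h'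
    simp at this
  · rcases List.getLast?_eq_some_iff.mp hl with ⟨t, ht⟩
    simp only [hl] at h'
    split_ifs at h' with hz hm <;>
      simp only [String.toList_ofList] at h' <;>
      have hlen := congrArg List.length h' <;>
      rw [ht] at hlen <;> simp at hlen

-- the per-word option lists of A and B coincide
theorem pv_options_eq (w : String) :
    (if w ∈ pvPrepositions then [w] else [w, pvPluralize w pvSuffixes]) = pvAltOptions w := by
  have hprep : (PySem.Set.contains pvPrepSet w = true) ↔ w ∈ pvPrepositions := by
    rw [PySem.Set.contains_iff]
    unfold pvPrepSet pvPrepositions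
    rw [PySem.Set.mem_ofList]
  unfold pvAltOptions
  by_cases hw : w ∈ pvPrepositions
  · rw [if_pos hw, if_pos (hprep.mpr hw)]
  · rw [if_neg hw, if_neg (fun h => hw (hprep.mp h))]
    rw [pv_pluralize_eq w, pv_ends1 w "z" 'z' rfl]
    have hget : PySem.Str.pyGet? w (-1) = w.toList.getLast? := by
      rw [PySem.Str.pyGet?_eq, PySem.Chars.pyGet?_eq_listPyGet?, pv_pyget_neg_one]
    have hsl : (PySem.Str.slice w none (some (-1))).toList = w.toList.dropLast :=
      PySem.Str.slice_to_neg_one w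
    rw [hget]
    rcases hl : w.toList.getLast? with _ | c
    · simp
    · by_cases hz : c = 'z'
      · subst hz
        simp [hsl]
      · simp [hz]
        split_ifs <;> rfl

theorem pv_join_step (p o : String) (q : List String) :
    PySem.Str.join " " (p :: o :: q)
      = PySem.Str.join " " (String.ofList (p.toList ++ ' ' :: o.toList) :: q) := by
  apply String.toList_inj.mp
  rw [PySem.Str.toList_join, PySem.Str.toList_join]
  rcases q with _ | ⟨y, r⟩ <;>
    simp [PySem.Chars.join_cons_cons, PySem.Chars.join_singleton, List.append_assoc]

theorem pv_join_left (q : List String) (p : String) :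
    pvJoinLeft p q = PySem.Str.join " " (p :: q) := by
  induction q generalizing p with
  | nil =>
    show p = _
    apply String.toList_inj.mp
    rw [PySem.Str.toList_join]
    simp [PySem.Chars.join_singleton]
  | cons o q ih =>
    show pvJoinLeft (String.ofList (p.toList ++ ' ' :: o.toList)) q = _
    rw [ih, ← pv_join_step]

-- the accumulator fold of B computes A's product-then-join
theorem pv_fold_product (ws : List String) (acc : List String) :
    ws.foldl (fun result w' =>
        result.flatMap (fun p => (pvAltOptions w').map (fun o => String.ofList (p.toList ++ ' ' :: o.toList)))) acc
      = acc.flatMap (fun p => (pvProduct (ws.map pvAltOptions)).map (pvJoinLeft p)) := by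
  induction ws generalizing acc with
  | nil => simp [pvProduct, pvJoinLeft]
  | cons w' ws ih =>
    rw [List.foldl_cons, ih]
    simp [pvProduct, pvJoinLeft, List.map_flatMap, List.flatMap_map, List.flatMap_assoc,
      Function.comp_def]

-- ===== VERDICT (by name: the statement is the Claim_ definition above) =====
theorem pluralize_word_spec : Claim_equal_pluralize_word := by
  intro word _
  show pluralize_word word = pluralize_word_alt word
  unfold pluralize_word pluralize_word_alt
  have hbody : (fun (acc : List (List String)) (w : String) =>
      if w ∈ pvPrepositions then acc ++ [[w]]
      else
        let plural := pvPluralize w pvSuffixes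
        if plural ≠ w then acc ++ [[w, plural]] else acc ++ [[w]])
      = fun acc w => acc ++ [pvAltOptions w] := by
    funext acc w
    rw [← pv_options_eq w]
    by_cases hw : w ∈ pvPrepositions
    · rw [if_pos hw, if_pos hw]
    · rw [if_neg hw, if_neg hw]
      show (if pvPluralize w pvSuffixes ≠ w then _ else _) = _
      rw [if_pos (pv_pluralize_ne w)]
  simp only [hbody]
  rw [PySem.List.foldl_append_singleton_eq_map, PySem.List.foldl_append_singleton_eq_map]
  rcases PySem.Str.split₀ word with _ | ⟨w, rest⟩
  · show [] ++ List.map (PySem.Str.join " ") (pvProduct ([] ++ List.map pvAltOptions [])) = [""]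
    simp [pvProduct]
    apply String.toList_inj.mp
    rw [PySem.Str.toList_join]
    simp [PySem.Chars.join_nil]
  · show [] ++ List.map (PySem.Str.join " ") (pvProduct ([] ++ List.map pvAltOptions (w :: rest)))
      = rest.foldl _ (pvAltOptions w)
    rw [pv_fold_product]
    have hjl : ∀ p : String, pvJoinLeft p = fun q => PySem.Str.join " " (p :: q) :=
      fun p => funext (fun q => pv_join_left q p)
    simp [pvProduct, List.map_flatMap, List.map_map, Function.comp_def, hjl]
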